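-- pv_equiv track=rewrite | github.com/stranske/Trend_Model_Project | src/trend/compat_entrypoints.py | _translate_trend_run_args
-- ===== SOURCE A (Python) =====
-- def _translate_trend_run_args(args: list[str]) -> tuple[list[str], bool, bool]:
--     translated: list[str] = []
--     output_seen = False
--     out_dir_seen = False
--     idx = 0
--     while idx < len(args):
--         token = args[idx]
--         if token == "--artefacts":
--             out_dir_seen = True
--             translated.append("--out")
--             if idx + 1 < len(args):
--                 translated.append(args[idx + 1])
--                 idx += 2
--                 continue
--             idx += 1
--             continue
--         if token.startswith("--artefacts="):
--             out_dir_seen = True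
--             translated.append("--out=" + token.split("=", 1)[1])
--             idx += 1
--             continue
--         if token == "-o":
--             output_seen = True
--             translated.append("--output")
--             if idx + 1 < len(args):
--                 translated.append(args[idx + 1])
--                 idx += 2
--                 continue
--             idx += 1
--             continue
--         if token.startswith("-o="):
--             output_seen = True
--             translated.append("--output=" + token.split("=", 1)[1])
--             idx += 1
--             continue
--         if token == "--output":
--             output_seen = True
--             translated.append(token)
--             if idx + 1 < len(args):
--                 translated.append(args[idx + 1])
--                 idx += 2
--                 continue
--             idx += 1
--             continue
--         if token.startswith("--output="):
--             output_seen = True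
--             translated.append(token)
--             idx += 1
--             continue
--         translated.append(token)
--         idx += 1
--     return translated, output_seen, out_dir_seen
-- ===== SOURCE B (Python) =====
-- _ALIAS_KEYS = ("--artefacts", "-o", "--output")
--
--
-- def _rewrite(tok: str) -> str:
--     if tok == "--artefacts":
--         return "--out"
--     if tok.startswith("--artefacts="):
--         return "--out=" + tok.split("=", 1)[1]
--     if tok == "-o":
--         return "--output"
--     if tok.startswith("-o="):
--         return "--output=" + tok.split("=", 1)[1]
--     return tok
--
--
-- def _translate_trend_run_args(args: list[str]) -> tuple[list[str], bool, bool]: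
--     # Pass 1: mark each position that is the value consumed by a preceding exact alias flag.
--     shielded: list[bool] = []
--     prev = False
--     for tok in args:
--         shielded.append(prev)
--         prev = (not prev) and tok in _ALIAS_KEYS
--     # Pass 2: rewrite every unshielded token, keep shielded ones verbatim.
--     translated = [tok if sh else _rewrite(tok) for tok, sh in zip(args, shielded)]
--     # Pass 3: the flags, from the unshielded tokens only.
--     active = [tok for tok, sh in zip(args, shielded) if not sh]
--     output_seen = any(
--         t == "-o" or t.startswith("-o=") or t == "--output" or t.startswith("--output=")
--         for t in active
--     )
--     out_dir_seen = any(t == "--artefacts" or t.startswith("--artefacts=") for t in active)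
--     return translated, output_seen, out_dir_seen
-- ===== Notes on version B (the rewrite author's own statement) =====
-- stated objective: alternative
-- what changed: B replaces A's single stateful index-walk with idx+=2 skips by three staged passes: a scan computing a boolean shield mask of value positions consumed by exact alias flags, then a pure per-token rewrite map over the unshielded tokens, then any-queries over the unshielded tokens for the two flags.
import Mathlib
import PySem

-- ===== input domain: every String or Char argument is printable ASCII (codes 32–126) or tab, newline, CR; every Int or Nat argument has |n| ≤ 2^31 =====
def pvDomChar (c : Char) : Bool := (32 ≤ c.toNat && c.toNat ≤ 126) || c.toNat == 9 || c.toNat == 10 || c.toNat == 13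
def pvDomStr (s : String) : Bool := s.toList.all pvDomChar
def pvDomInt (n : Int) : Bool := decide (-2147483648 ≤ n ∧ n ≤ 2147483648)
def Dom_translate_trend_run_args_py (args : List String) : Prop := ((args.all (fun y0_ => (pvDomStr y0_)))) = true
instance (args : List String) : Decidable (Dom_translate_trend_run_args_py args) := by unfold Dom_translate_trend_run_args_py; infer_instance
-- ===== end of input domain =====

-- B replaces A's stateful index-walk (with idx+=2 skips) by three staged passes: a shield-mask
-- scan, a pure per-token rewrite map, and any-queries for the flags (objective: alternative).

-- Python's tok.split("=", 1) — this exact expression occurs in both A and B, so both ports use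
-- this helper.  The `none` arm is unreachable: the separator "=" is nonempty.
def pvSplit1 (tok : String) : List String :=
  match PySem.Str.splitMax? tok "=" 1 with
  | some parts => parts
  | none => []

-- ===== PORT A =====
-- the while loop of A: `rem` is args[idx:], `translated`/`output_seen`/`out_dir_seen` the state.
-- Under the startswith guards token.split("=",1)[1] always exists, so `getD 1 ""` is exact there.
def pvAGo (rem translated : List String) (output_seen out_dir_seen : Bool) :
    List String × Bool × Bool :=
  match rem with
  | [] => (translated, output_seen, out_dir_seen)
  | token :: rest =>
    if token = "--artefacts" then
      match rest with
      | next :: rest' => pvAGo rest' (translated ++ ["--out", next]) output_seen true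
      | [] => pvAGo [] (translated ++ ["--out"]) output_seen true
    else if PySem.Str.startswith token "--artefacts=" then
      pvAGo rest (translated ++ ["--out=" ++ (pvSplit1 token).getD 1 ""]) output_seen true
    else if token = "-o" then
      match rest with
      | next :: rest' => pvAGo rest' (translated ++ ["--output", next]) true out_dir_seen
      | [] => pvAGo [] (translated ++ ["--output"]) true out_dir_seen
    else if PySem.Str.startswith token "-o=" then
      pvAGo rest (translated ++ ["--output=" ++ (pvSplit1 token).getD 1 ""]) true out_dir_seen
    else if token = "--output" then
      match rest with
      | next :: rest' => pvAGo rest' (translated ++ [token, next]) true out_dir_seen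
      | [] => pvAGo [] (translated ++ [token]) true out_dir_seen
    else if PySem.Str.startswith token "--output=" then
      pvAGo rest (translated ++ [token]) true out_dir_seen
    else
      pvAGo rest (translated ++ [token]) output_seen out_dir_seen
  termination_by rem.length
  decreasing_by all_goals (simp [List.length]; try omega)

def translate_trend_run_args_py (args : List String) : List String × Bool × Bool :=
  pvAGo args [] false false

-- ===== PORT B =====
-- the module-level tuple _ALIAS_KEYS of Source B
def pvAliasKeys : List String := ["--artefacts", "-o", "--output"]

-- Source B's helper _rewrite
def pvRewrite (tok : String) : String :=
  if tok = "--artefacts" then "--out"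
  else if PySem.Str.startswith tok "--artefacts=" then "--out=" ++ (pvSplit1 tok).getD 1 ""
  else if tok = "-o" then "--output"
  else if PySem.Str.startswith tok "-o=" then "--output=" ++ (pvSplit1 tok).getD 1 ""
  else tok

-- Source B's flag predicates (the bodies of the two any(...) generator expressions)
def pvPredOut (t : String) : Bool :=
  t == "-o" || PySem.Str.startswith t "-o=" || t == "--output"
    || PySem.Str.startswith t "--output="

def pvPredDir (t : String) : Bool :=
  t == "--artefacts" || PySem.Str.startswith t "--artefacts="

def translate_trend_run_args_py_alt (args : List String) : List String × Bool × Bool :=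
  -- pass 1: the shield mask (loop appending `prev`, updating it)
  let shielded := (args.foldl (fun (st : List Bool × Bool) tok =>
      (st.1 ++ [st.2], !st.2 && pvAliasKeys.contains tok)) ([], false)).1
  -- pass 2: rewrite unshielded tokens
  let translated := (args.zip shielded).map (fun p => if p.2 then p.1 else pvRewrite p.1)
  -- pass 3: flags from the unshielded tokens
  let active := ((args.zip shielded).filter (fun p => !p.2)).map Prod.fst
  (translated, active.any pvPredOut, active.any pvPredDir)

-- ===== PRECONDITION & SPEC =====
def Spec_translate_trend_run_args_py (args : List String) (out : List String × Bool × Bool) : Prop := out = translate_trend_run_args_py_alt args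
instance (args : List String) (out : List String × Bool × Bool) : Decidable (Spec_translate_trend_run_args_py args out) := by unfold Spec_translate_trend_run_args_py; infer_instance

-- ===== CLAIM (what is proved, stated in full; the proofs are below) =====
def Claim_equal_translate_trend_run_args_py : Prop := ∀ (args : List String), Dom_translate_trend_run_args_py args → Spec_translate_trend_run_args_py args (translate_trend_run_args_py args)

-- ===== LEMMAS AND PROOFS =====

-- the shield mask, in structural form
def pvSh : List String → Bool → List Bool
  | [], _ => []
  | t :: r, p => p :: pvSh r (!p && pvAliasKeys.contains t)

lemma pv_foldl_sh (args : List String) : ∀ (acc : List Bool) (p : Bool),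
    (args.foldl (fun (st : List Bool × Bool) tok =>
      (st.1 ++ [st.2], !st.2 && pvAliasKeys.contains tok)) (acc, p)).1 = acc ++ pvSh args p := by
  induction args with
  | nil => intro acc p; simp [pvSh]
  | cons t r ih =>
    intro acc p
    simp only [List.foldl_cons, ih, pvSh]
    simp

-- B's pipeline in relative (accumulator-free) form
def pvBrel (rem : List String) : List String × Bool × Bool :=
  let sh := pvSh rem false
  (((rem.zip sh).map (fun p => if p.2 then p.1 else pvRewrite p.1)),
    (((rem.zip sh).filter (fun p => !p.2)).map Prod.fst).any pvPredOut,
    (((rem.zip sh).filter (fun p => !p.2)).map Prod.fst).any pvPredDir)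

lemma pv_alt_eq_Brel (args : List String) : translate_trend_run_args_py_alt args = pvBrel args := by
  unfold translate_trend_run_args_py_alt pvBrel
  rw [pv_foldl_sh args [] false]
  simp

-- if a string has a first '=' the decomposition around it is unique
lemma pv_firstEq_unique : ∀ (a : List Char) {b x y : List Char}, '=' ∉ a → '=' ∉ b →
    a ++ '=' :: x = b ++ '=' :: y → a = b ∧ x = y := by
  intro a
  induction a with
  | nil =>
    intro b x y _ hb h
    cases b with
    | nil => simpa using h
    | cons c b' =>
      simp at h
      exact absurd (h.1 ▸ List.mem_cons_self) hb
  | cons c a' ih =>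
    intro b x y ha hb h
    cases b with
    | nil =>
      simp at h
      exact absurd (h.1 ▸ List.mem_cons_self) ha
    | cons c' b' =>
      simp at h
      obtain ⟨rfl, h2⟩ := h
      obtain ⟨rfl, rfl⟩ := ih (fun m => ha (List.mem_cons_of_mem _ m))
        (fun m => hb (List.mem_cons_of_mem _ m)) h2
      exact ⟨rfl, rfl⟩

lemma pv_prefix_eq_iff (p k v : List Char) (hp : '=' ∉ p) (hk : '=' ∉ k) :
    ((p ++ ['=']) <+: (k ++ '=' :: v)) ↔ p = k := by
  constructor
  · rintro ⟨t, ht⟩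
    rw [List.append_assoc] at ht
    exact (pv_firstEq_unique p hp hk (by simpa using ht)).1
  · rintro rfl
    exact ⟨v, by simp⟩

lemma pv_no_prefix_of_noeq (p s : List Char) (hs : '=' ∉ s) : ¬ ((p ++ ['=']) <+: s) := by
  intro h
  exact hs (h.subset (by simp))

-- every string either has no '=' or splits uniquely at its first '='
lemma pv_eq_decomp : ∀ (s : List Char), '=' ∈ s → ∃ k v, s = k ++ '=' :: v ∧ '=' ∉ k := by
  intro s
  induction s with
  | nil => intro h; simp at h
  | cons c rest ih =>
    intro h
    by_cases hc : c = '='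
    · exact ⟨[], rest, by simp [hc], by simp⟩
    · have h' : '=' ∈ rest := by
        rcases List.mem_cons.mp h with h | h
        · exact absurd h.symm hc
        · exact h
      obtain ⟨k, v, hkv, hk⟩ := ih h'
      refine ⟨c :: k, v, by simp [hkv], ?_⟩
      intro hm
      rcases List.mem_cons.mp hm with h'' | h''
      · exact hc h''.symm
      · exact hk h''

-- the alias prefix tests, phrased through the first-'=' decomposition
lemma pv_sw_iff (tok p : String) (k v : List Char) (hs : tok.toList = k ++ '=' :: v)
    (hk : '=' ∉ k) (hp : '=' ∉ p.toList) :
    PySem.Str.startswith tok (p ++ "=") = (String.ofList k == p) := by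
  simp only [PySem.Str.startswith_eq, PySem.Chars.startswith]
  by_cases hkp : String.ofList k = p
  · have hkl : k = p.toList := by
      have := congrArg String.toList hkp; simpa using this
    rw [beq_iff_eq.mpr hkp]
    rw [List.isPrefixOf_iff_prefix, String.toList_append, hs, hkl]
    exact (pv_prefix_eq_iff p.toList p.toList v hp hp).mpr rfl
  · rw [beq_false_of_ne hkp]
    apply eq_false_of_ne_true
    rw [List.isPrefixOf_iff_prefix, String.toList_append, hs]
    intro hpre
    have := (pv_prefix_eq_iff p.toList k v hp hk).mp hpre
    exact hkp (by rw [← this, String.ofList_toList])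

lemma pv_sw_false (tok p : String) (hmem : '=' ∉ tok.toList) :
    PySem.Str.startswith tok (p ++ "=") = false := by
  simp only [PySem.Str.startswith_eq, PySem.Chars.startswith]
  apply eq_false_of_ne_true
  rw [List.isPrefixOf_iff_prefix, String.toList_append]
  exact pv_no_prefix_of_noeq p.toList tok.toList hmem

-- pvBrel on a cons whose head is not an exact alias key
lemma pv_Brel_cons (tok : String) (rest : List String)
    (hcont : tok ∉ pvAliasKeys) :
    pvBrel (tok :: rest) = (pvRewrite tok :: (pvBrel rest).1,
      pvPredOut tok || (pvBrel rest).2.1, pvPredDir tok || (pvBrel rest).2.2) := by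
  simp [pvBrel, pvSh, hcont]

-- pvBrel on an exact alias key followed by its (shielded) value
lemma pv_Brel_alias (tok next : String) (rest : List String)
    (hcont : tok ∈ pvAliasKeys) :
    pvBrel (tok :: next :: rest) = (pvRewrite tok :: next :: (pvBrel rest).1,
      pvPredOut tok || (pvBrel rest).2.1, pvPredDir tok || (pvBrel rest).2.2) := by
  simp [pvBrel, pvSh, hcont]

lemma pv_Brel_single (tok : String) :
    pvBrel [tok] = ([pvRewrite tok], pvPredOut tok, pvPredDir tok) := by
  simp [pvBrel, pvSh]

-- pvRewrite and the flag predicates on the three exact alias keys, evaluated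
lemma pv_lit_art : pvRewrite "--artefacts" = "--out" ∧ pvPredOut "--artefacts" = false
    ∧ pvPredDir "--artefacts" = true := by decide

lemma pv_lit_o : pvRewrite "-o" = "--output" ∧ pvPredOut "-o" = true
    ∧ pvPredDir "-o" = false := by decide

lemma pv_lit_out : pvRewrite "--output" = "--output" ∧ pvPredOut "--output" = true
    ∧ pvPredDir "--output" = false := by decide

-- the main invariant: A's walk from any state equals the state combined with B's staged pipeline
lemma pv_main : ∀ (n : Nat) (rem : List String), rem.length ≤ n →
    ∀ (tr : List String) (o d : Bool),
    pvAGo rem tr o d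
      = (tr ++ (pvBrel rem).1, o || (pvBrel rem).2.1, d || (pvBrel rem).2.2) := by
  intro n
  induction n with
  | zero =>
    intro rem h tr o d
    cases rem with
    | nil => simp [pvAGo, pvBrel, pvSh]
    | cons a b => simp at h
  | succ n ih =>
    intro rem hlen tr o d
    cases rem with
    | nil => simp [pvAGo, pvBrel, pvSh]
    | cons tok rest =>
      have hr : rest.length ≤ n := by simpa using hlen
      by_cases hmem : '=' ∈ tok.toList
      · obtain ⟨k, v, hs, hk⟩ := pv_eq_decomp tok.toList hmem
        have hne1 : tok ≠ "--artefacts" := by rintro rfl; revert hmem; decide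
        have hne2 : tok ≠ "-o" := by rintro rfl; revert hmem; decide
        have hne3 : tok ≠ "--output" := by rintro rfl; revert hmem; decide
        have hcont : tok ∉ pvAliasKeys := by
          simp [pvAliasKeys, hne1, hne2, hne3]
        have hsw1 : PySem.Str.startswith tok "--artefacts=" = (String.ofList k == "--artefacts") :=
          pv_sw_iff tok "--artefacts" k v hs hk (by decide)
        have hsw2 : PySem.Str.startswith tok "-o=" = (String.ofList k == "-o") :=
          pv_sw_iff tok "-o" k v hs hk (by decide)
        have hsw3 : PySem.Str.startswith tok "--output=" = (String.ofList k == "--output") :=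
          pv_sw_iff tok "--output" k v hs hk (by decide)
        rw [pvAGo.eq_def, pv_Brel_cons tok rest hcont]
        by_cases hk1 : String.ofList k = "--artefacts"
        · rw [hk1] at hsw1 hsw2 hsw3
          simp at hsw1 hsw2 hsw3
          simp [hne1, hne2, hne3, beq_false_of_ne hne1, beq_false_of_ne hne2,
            beq_false_of_ne hne3, hsw1, hsw2, hsw3, ih rest hr, pvRewrite, pvPredOut,
            pvPredDir, Bool.or_comm, Bool.or_left_comm]
        · by_cases hk2 : String.ofList k = "-o"
          · rw [hk2] at hsw1 hsw2 hsw3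
            simp at hsw1 hsw2 hsw3
            simp [hne1, hne2, hne3, beq_false_of_ne hne1, beq_false_of_ne hne2,
            beq_false_of_ne hne3, hsw1, hsw2, hsw3, ih rest hr, pvRewrite, pvPredOut,
              pvPredDir, Bool.or_comm, Bool.or_left_comm]
          · by_cases hk3 : String.ofList k = "--output"
            · rw [hk3] at hsw1 hsw2 hsw3
              simp at hsw1 hsw2 hsw3
              simp [hne1, hne2, hne3, beq_false_of_ne hne1, beq_false_of_ne hne2,
            beq_false_of_ne hne3, hsw1, hsw2, hsw3, ih rest hr, pvRewrite, pvPredOut,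
                pvPredDir, Bool.or_comm, Bool.or_left_comm]
            · rw [beq_false_of_ne hk1] at hsw1
              rw [beq_false_of_ne hk2] at hsw2
              rw [beq_false_of_ne hk3] at hsw3
              simp at hsw1 hsw2 hsw3
              simp [hne1, hne2, hne3, beq_false_of_ne hne1, beq_false_of_ne hne2,
            beq_false_of_ne hne3, hsw1, hsw2, hsw3, ih rest hr, pvRewrite, pvPredOut,
                pvPredDir]
      · have hsw1 : PySem.Str.startswith tok "--artefacts=" = false :=
          pv_sw_false tok "--artefacts" hmem
        have hsw2 : PySem.Str.startswith tok "-o=" = false := pv_sw_false tok "-o" hmem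
        have hsw3 : PySem.Str.startswith tok "--output=" = false := pv_sw_false tok "--output" hmem
        by_cases h1 : tok = "--artefacts"
        · subst h1
          simp at hsw1 hsw2 hsw3
          rw [pvAGo.eq_def]
          cases rest with
          | nil =>
            simp [hsw1, hsw2, hsw3, ih [] (by simp), pv_Brel_single, pvBrel, pvSh,
              pv_lit_art.1, pv_lit_art.2.1, pv_lit_art.2.2]
          | cons next rest' =>
            have hr' : rest'.length ≤ n := by simp at hlen; omega
            simp [hsw1, hsw2, hsw3, ih rest' hr', pv_Brel_alias "--artefacts" next rest' (by decide),
              pv_lit_art.1, pv_lit_art.2.1, pv_lit_art.2.2, Bool.or_comm, Bool.or_left_comm]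
        · by_cases h2 : tok = "-o"
          · subst h2
            simp at hsw1 hsw2 hsw3
            rw [pvAGo.eq_def]
            cases rest with
            | nil =>
              simp [hsw1, hsw2, hsw3, ih [] (by simp), pv_Brel_single, pvBrel, pvSh,
                pv_lit_o.1, pv_lit_o.2.1, pv_lit_o.2.2]
            | cons next rest' =>
              have hr' : rest'.length ≤ n := by simp at hlen; omega
              simp [hsw1, hsw2, hsw3, ih rest' hr', pv_Brel_alias "-o" next rest' (by decide),
                pv_lit_o.1, pv_lit_o.2.1, pv_lit_o.2.2, Bool.or_comm, Bool.or_left_comm]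
          · by_cases h3 : tok = "--output"
            · subst h3
              simp at hsw1 hsw2 hsw3
              rw [pvAGo.eq_def]
              cases rest with
              | nil =>
                simp [hsw1, hsw2, hsw3, ih [] (by simp), pv_Brel_single, pvBrel, pvSh,
                  pv_lit_out.1, pv_lit_out.2.1, pv_lit_out.2.2]
              | cons next rest' =>
                have hr' : rest'.length ≤ n := by simp at hlen; omega
                simp [hsw1, hsw2, hsw3, ih rest' hr', pv_Brel_alias "--output" next rest' (by decide),
                  pv_lit_out.1, pv_lit_out.2.1, pv_lit_out.2.2, Bool.or_comm, Bool.or_left_comm]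
            · have hcont : tok ∉ pvAliasKeys := by
                simp [pvAliasKeys, h1, h2, h3]
              rw [pvAGo.eq_def, pv_Brel_cons tok rest hcont]
              simp at hsw1 hsw2 hsw3
              simp [h1, h2, h3, beq_false_of_ne h1, beq_false_of_ne h2, beq_false_of_ne h3,
                hsw1, hsw2, hsw3, ih rest hr, pvRewrite, pvPredOut, pvPredDir]

-- ===== VERDICT (by name: the statement is the Claim_ definition above) =====
theorem translate_trend_run_args_py_spec : Claim_equal_translate_trend_run_args_py := by
  intro args _
  unfold Spec_translate_trend_run_args_py translate_trend_run_args_py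
  rw [pv_alt_eq_Brel, pv_main args.length args le_rfl [] false false]
  simp
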